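-- pv_equiv track=rewrite | github.com/Zeilanda/netology_regular_expression | main.py | merge_duplicated_strings
-- ===== SOURCE A (Python) =====
-- def compare_values(x, y):
--     if x == y:
--         return True
--     else:
--         return False
--
-- def get_double_strings_index(phone_list: list[list[str]]) -> list[tuple[int, int]]:
--     result_list = []
--     for i, data_first in enumerate(phone_list):
--         for j, data_second in enumerate(phone_list):
--             if i > j:
--                 result = list(map(compare_values, data_first, data_second))
--                 if result[0] and result[1]:
--                     result_list.append((i, j))
--     return result_list
--
-- def concatenate_strings(string_1: str, string_2: str) -> str:
--     if string_1 == '' and string_2: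
--         return string_2
--     elif string_2 == '' and string_1:
--         return string_1
--     else:
--         return string_1
--
-- def merge_strings(first_string: list[str], second_string: list[str]) -> list[str]:
--     result = list(map(concatenate_strings, first_string, second_string))
--     return result
--
-- def merge_duplicated_strings(strings: list[list[str]]):
--     double_strings_index = get_double_strings_index(strings)
--     result = []
--     for i, str_ in enumerate(strings):
--         for index_pair in double_strings_index:
--             if i == index_pair[0]:
--                 str_ = merge_strings(strings[index_pair[0]], strings[index_pair[1]])
--             elif i == index_pair[1]:
--                 str_ = ""
--         if str_:
--             result.append(str_)
--
--     return result
-- ===== SOURCE B (Python) =====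
-- def merge_duplicated_strings(strings: list[list[str]]):
--     # One pass to find the last occurrence of each (col0, col1) key, then one
--     # pass emitting each surviving row at the position of its last occurrence,
--     # merged element-wise with its immediately preceding occurrence (if any).
--     last_idx = {}
--     for i, row in enumerate(strings):
--         last_idx[tuple(row[:2])] = i
--
--     result = []
--     prev = {}
--     for i, row in enumerate(strings):
--         key = tuple(row[:2])
--         if last_idx[key] == i:
--             if key in prev:
--                 merged = [a if a else b for a, b in zip(row, prev[key])]
--             else:
--                 merged = row
--             if merged:
--                 result.append(merged)
--         prev[key] = row
--     return result
-- ===== Notes on version B (the rewrite author's own statement) =====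
-- stated objective: faster
-- what changed: Replaced the quadratic duplicate-pair index list plus a rescan of all pairs for every row (O(n^3) overall) by two linear passes over a hash map keyed by the first two columns: record each key's last occurrence, then emit each row at its last occurrence merged with the immediately preceding occurrence.
import Mathlib
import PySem

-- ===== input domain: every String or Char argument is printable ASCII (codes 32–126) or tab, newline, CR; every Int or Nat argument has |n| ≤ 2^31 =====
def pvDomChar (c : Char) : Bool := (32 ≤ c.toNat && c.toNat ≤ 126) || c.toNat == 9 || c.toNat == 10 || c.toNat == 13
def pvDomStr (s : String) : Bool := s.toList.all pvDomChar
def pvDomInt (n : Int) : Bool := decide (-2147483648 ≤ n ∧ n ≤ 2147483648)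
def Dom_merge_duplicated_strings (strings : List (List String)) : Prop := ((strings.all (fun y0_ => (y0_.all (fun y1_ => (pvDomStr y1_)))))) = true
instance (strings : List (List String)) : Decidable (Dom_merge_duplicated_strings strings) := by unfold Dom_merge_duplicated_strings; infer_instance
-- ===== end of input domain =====

-- B replaces A's cubic scan over a quadratic duplicate-pair list by two linear passes
-- over hash maps keyed by the first two columns (objective: faster).


-- ===== PORT A =====
def compare_values (x y : String) : Bool := x == y

def get_double_strings_index (phone_list : List (List String)) : List (Int × Int) :=
  (PySem.List.enumerate phone_list).foldl (fun result_list p =>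
    (PySem.List.enumerate phone_list).foldl (fun result_list q =>
      if p.1 > q.1 then
        let result := List.zipWith compare_values p.2 q.2
        -- result[0] / result[1]: the IndexError cases are excluded by Pre_; pyGetD stands for them
        if PySem.List.pyGetD result 0 false && PySem.List.pyGetD result 1 false then
          result_list ++ [(p.1, q.1)]
        else result_list
      else result_list) result_list) []

def concatenate_strings (string_1 string_2 : String) : String :=
  if string_1 = "" ∧ string_2 ≠ "" then string_2
  else if string_2 = "" ∧ string_1 ≠ "" then string_1
  else string_1

def merge_strings (first_string second_string : List String) : List String :=
  List.zipWith concatenate_strings first_string second_string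

def merge_duplicated_strings (strings : List (List String)) : List (List String) :=
  let double_strings_index := get_double_strings_index strings
  (PySem.List.enumerate strings).foldl (fun result p =>
    -- str_ : Option (List String); none stands for Python's str_ = "" (falsy)
    let str_ : Option (List String) :=
      double_strings_index.foldl (fun str_ ip =>
        if p.1 == ip.1 then
          -- indices in double_strings_index come from enumerate, so they are in range
          some (merge_strings (PySem.List.pyGetD strings ip.1 []) (PySem.List.pyGetD strings ip.2 []))
        else if p.1 == ip.2 then none
        else str_) (some p.2)
    match str_ with
    | some l => if l.isEmpty then result else result ++ [l]
    | none => result) []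

-- ===== PORT B =====
-- tuple(row[:2]) is ported as the list row.take 2 (the slice bound is nonnegative,
-- so row[:2] = take 2; a variable-arity tuple of strings becomes a List String key)
def merge_duplicated_strings_alt (strings : List (List String)) : List (List String) :=
  let last_idx : PySem.Dict (List String) Int :=
    (PySem.List.enumerate strings).foldl (fun d p => d.insert (p.2.take 2) p.1) PySem.Dict.empty
  ((PySem.List.enumerate strings).foldl
    (fun (st : List (List String) × PySem.Dict (List String) (List String)) p =>
      let key := p.2.take 2
      let result :=
        -- last_idx[key] == i : the key is always present, so d[key] is get?
        if last_idx.get? key == some p.1 then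
          let merged := match st.2.get? key with
            | some pr => List.zipWith (fun a b => if a ≠ "" then a else b) p.2 pr
            | none => p.2
          if merged.isEmpty then st.1 else st.1 ++ [merged]
        else st.1
      (result, st.2.insert key p.2)) ([], PySem.Dict.empty)).1

-- ===== PRECONDITION & SPEC =====
-- Pre_ admits exactly the inputs on which the Python A returns normally: A raises
-- IndexError as soon as some pair of rows has an empty zip (one row empty) or shares
-- its first column while the zip has fewer than two entries.
def pvOk (r s : List String) : Prop :=
  1 ≤ min r.length s.length ∧ (r.headI = s.headI → 2 ≤ min r.length s.length)

def Pre_merge_duplicated_strings (strings : List (List String)) : Prop :=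
  strings.Pairwise pvOk

instance (strings : List (List String)) : Decidable (Pre_merge_duplicated_strings strings) := by
  unfold Pre_merge_duplicated_strings; unfold pvOk; infer_instance

def pvWitness_merge_duplicated_strings : List (List String) := [["a", "b"], ["a", "b"]]

def Spec_merge_duplicated_strings (strings : List (List String)) (out : List (List String)) : Prop := out = merge_duplicated_strings_alt strings
instance (strings : List (List String)) (out : List (List String)) : Decidable (Spec_merge_duplicated_strings strings out) := by unfold Spec_merge_duplicated_strings; infer_instance

-- ===== CLAIM (what is proved, stated in full; the proofs are below) =====
def Claim_equal_merge_duplicated_strings : Prop := ∀ (strings : List (List String)), Dom_merge_duplicated_strings strings → Pre_merge_duplicated_strings strings → Spec_merge_duplicated_strings strings (merge_duplicated_strings strings)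

-- ===== LEMMAS AND PROOFS =====

-- shared middle form: the value each surviving row contributes
def amatch (r s : List String) : Bool :=
  PySem.List.pyGetD (List.zipWith compare_values r s) 0 false &&
  PySem.List.pyGetD (List.zipWith compare_values r s) 1 false

def pvV (strings : List (List String)) (i : Int) (r : List String) : Option (List String) :=
  if (PySem.List.enumerate strings).any (fun q => decide (i < q.1) && (q.2.take 2 == r.take 2)) then none
  else
    match ((PySem.List.enumerate strings).filter (fun q => decide (q.1 < i) && (q.2.take 2 == r.take 2))).getLast? with
    | some q => if (merge_strings r q.2).isEmpty then none else some (merge_strings r q.2)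
    | none => if r.isEmpty then none else some r

def pvOut (strings : List (List String)) : List (List String) :=
  (PySem.List.enumerate strings).foldl (fun res p => res ++ (pvV strings p.1 p.2).toList) []



theorem pv_foldl_cu {α σ : Type} (t : α → Bool) (g : α → σ) :
    ∀ (l : List α) (s : σ),
      l.foldl (fun s a => if t a then g a else s) s = ((l.filter t).getLast?).elim s g := by
  intro l
  induction l with
  | nil => intro s; rfl
  | cons a l ih =>
      intro s
      rw [List.foldl_cons, List.filter_cons]
      by_cases h : t a
      · simp only [h, if_true]
        rw [ih (g a)]
        cases hfl : (l.filter t).getLast? with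
        | none =>
            have : l.filter t = [] := List.getLast?_eq_none_iff.mp hfl
            simp [this]
        | some b => simp [List.getLast?_cons, hfl]
      · simp only [h, if_false, Bool.false_eq_true]
        exact ih s

theorem pv_flatMap_if {α β : Type} (c : α → Bool) (f : α → β) (l : List α) :
    l.flatMap (fun a => if c a then [f a] else []) = (l.filter c).map f := by
  induction l with
  | nil => rfl
  | cons a l ih => by_cases h : c a <;> simp [h, ih]

theorem pv_mem_enum_bounds {α : Type} {p : Int × α} {l : List α} {s : Int}
    (h : p ∈ PySem.List.enumerate l s) : s ≤ p.1 ∧ p.1 < s + l.length := by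
  obtain ⟨k, hk, rfl⟩ := (PySem.List.mem_enumerate_iff l s p).mp h
  constructor <;> simp <;> omega


theorem pv_beq_comm {α : Type} [BEq α] [LawfulBEq α] (x y : α) : (x == y) = (y == x) := by
  by_cases h : x = y
  · simp [h]
  · have h1 : (x == y) = false := beq_eq_false_iff_ne.mpr h
    have h2 : (y == x) = false := beq_eq_false_iff_ne.mpr (Ne.symm h)
    rw [h1, h2]

theorem pv_ok_symm {r s : List String} (h : pvOk r s) : pvOk s r := by
  obtain ⟨h1, h2⟩ := h
  refine ⟨by omega, fun he => ?_⟩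
  have := h2 he.symm
  omega

theorem pv_amatch_key (r s : List String) (hok : pvOk r s) :
    amatch r s = (s.take 2 == r.take 2) := by
  obtain ⟨h1, h2⟩ := hok
  match r, s with
  | [], _ => simp at h1
  | _ :: _, [] => simp at h1
  | a :: r', b :: s' =>
    by_cases hab : a = b
    · subst hab
      have hlen : 2 ≤ min (a :: r').length (a :: s').length := h2 (by simp)
      match r', s' with
      | [], _ => simp at hlen
      | _ :: _, [] => simp at hlen
      | c :: r'', d :: s'' =>
        simp only [amatch, List.zipWith, compare_values]
        have g0 : PySem.List.pyGetD ((a == a) :: (c == d) :: List.zipWith compare_values r'' s'') 0 false = (a == a) := by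
          simp [PySem.List.pyGetD_zero_cons]
        have g1 : PySem.List.pyGetD ((a == a) :: (c == d) :: List.zipWith compare_values r'' s'') 1 false = (c == d) := by
          simp [PySem.List.pyGetD, PySem.List.pyGet?, PySem.List.pyIdx?]
        rw [g0, g1]
        simp [List.take, pv_beq_comm c d]
    · simp only [amatch, List.zipWith, compare_values]
      have g0 : PySem.List.pyGetD ((a == b) :: List.zipWith compare_values r' s') 0 false = (a == b) := by
        simp [PySem.List.pyGetD_zero_cons]
      have hb : (a == b) = false := by simp [hab]
      have hb' : (b == a) = false := by simp [Ne.symm hab]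
      rw [g0, hb]
      simp [List.take, hb']



theorem pv_enum_split {α : Type} (pre : List α) (r : α) (post : List α) :
    PySem.List.enumerate (pre ++ r :: post) 0 =
      PySem.List.enumerate pre 0 ++ ((pre.length : Int), r) :: PySem.List.enumerate post ((pre.length : Int) + 1) := by
  rw [PySem.List.enumerate_append, PySem.List.enumerate_cons]
  simp

theorem pv_filter_prev {α : Type} (pre : List α) (r : α) (post : List α) (P : α → Bool) :
    (PySem.List.enumerate (pre ++ r :: post) 0).filter
        (fun q => decide (q.1 < (pre.length : Int)) && P q.2) =
      (PySem.List.enumerate pre 0).filter (fun q => decide (q.1 < (pre.length : Int)) && P q.2) := by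
  rw [pv_enum_split, List.filter_append, List.filter_cons]
  have h2 : (PySem.List.enumerate post ((pre.length : Int) + 1)).filter
      (fun q => decide (q.1 < (pre.length : Int)) && P q.2) = [] := by
    apply List.filter_eq_nil_iff.mpr
    intro q hq
    have := pv_mem_enum_bounds hq
    simp only [Bool.and_eq_true, decide_eq_true_eq]
    omega
  simp [h2]

theorem pv_filter_prev' {α : Type} (pre : List α) (P : α → Bool) :
    (PySem.List.enumerate pre 0).filter (fun q => decide (q.1 < (pre.length : Int)) && P q.2) =
      (PySem.List.enumerate pre 0).filter (fun q => P q.2) := by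
  apply List.filter_congr
  intro q hq
  have hb := pv_mem_enum_bounds hq
  have : decide (q.1 < (pre.length : Int)) = true := by simp; omega
  rw [this, Bool.true_and]

theorem pv_any_congr {α : Type} {p q : α → Bool} (l : List α)
    (h : ∀ a ∈ l, p a = q a) : l.any p = l.any q := by
  induction l with
  | nil => rfl
  | cons a l ih =>
      simp only [List.any_cons, h a (by simp)]
      rw [ih (fun a ha => h a (by simp [ha]))]

theorem pv_any_later {α : Type} (pre : List α) (r : α) (post : List α) (P : α → Bool) :
    (PySem.List.enumerate (pre ++ r :: post) 0).any
        (fun q => decide ((pre.length : Int) < q.1) && P q.2) = post.any P := by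
  rw [pv_enum_split]
  simp only [List.any_append, List.any_cons]
  have h1 : (PySem.List.enumerate pre 0).any
      (fun q => decide ((pre.length : Int) < q.1) && P q.2) = false := by
    apply List.any_eq_false.mpr
    intro q hq
    have := pv_mem_enum_bounds hq
    simp only [Bool.and_eq_true, decide_eq_true_eq, not_and]
    intro h; omega
  have h2 : (PySem.List.enumerate post ((pre.length : Int) + 1)).any
      (fun q => decide ((pre.length : Int) < q.1) && P q.2) =
      (PySem.List.enumerate post ((pre.length : Int) + 1)).any (fun q => P q.2) := by
    apply pv_any_congr
    intro q hq
    have hb := pv_mem_enum_bounds hq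
    have : decide ((pre.length : Int) < q.1) = true := by simp; omega
    rw [this, Bool.true_and]
  have h3 : (PySem.List.enumerate post ((pre.length : Int) + 1)).any (fun q => P q.2) = post.any P := by
    have := PySem.List.map_snd_enumerate post ((pre.length : Int) + 1)
    calc (PySem.List.enumerate post ((pre.length : Int) + 1)).any (fun q => P q.2)
        = ((PySem.List.enumerate post ((pre.length : Int) + 1)).map (·.2)).any P := by
          rw [List.any_map]; rfl
      _ = post.any P := by rw [this]
  rw [h1, h2, h3]
  simp

theorem pv_snd_filter_getLast {α : Type} (l : List α) (s : Int) (P : α → Bool) :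
    (((PySem.List.enumerate l s).filter (fun q => P q.2)).getLast?).map Prod.snd =
      (l.filter P).getLast? := by
  have h1 : ((PySem.List.enumerate l s).filter (fun q => P q.2)).map Prod.snd =
      ((PySem.List.enumerate l s).map Prod.snd).filter P := by
    rw [List.filter_map]; rfl
  have h2 : ((PySem.List.enumerate l s).map Prod.snd) = l := by
    have := PySem.List.map_snd_enumerate l s
    simpa using this
  rw [← List.getLast?_map, h1, h2]

theorem pv_getD_enum (pre : List (List String)) (rest : List (List String))
    {q : Int × List String} (hq : q ∈ PySem.List.enumerate pre 0) :
    PySem.List.pyGetD (pre ++ rest) q.1 [] = q.2 := by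
  obtain ⟨k, hk, rfl⟩ := (PySem.List.mem_enumerate_iff pre 0 q).mp hq
  simp only [zero_add]
  rw [PySem.List.pyGetD_natCast]
  simp [List.getD, List.getElem?_append_left hk, hk]

theorem pv_getD_mid (pre : List (List String)) (r : List String) (post : List (List String)) :
    PySem.List.pyGetD (pre ++ r :: post) (pre.length : Int) [] = r := by
  rw [PySem.List.pyGetD_natCast]
  simp [List.getD]

theorem pv_mem_split {α : Type} {p : Int × α} {l : List α}
    (h : p ∈ PySem.List.enumerate l 0) :
    ∃ pre post, l = pre ++ p.2 :: post ∧ p.1 = (pre.length : Int) := by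
  obtain ⟨k, hk, rfl⟩ := (PySem.List.mem_enumerate_iff l 0 p).mp h
  refine ⟨l.take k, l.drop (k + 1), ?_, by simp [List.length_take, hk.le]⟩
  simp [List.getElem_cons_drop, List.take_append_drop]


theorem pv_dsi (strings : List (List String)) :
    get_double_strings_index strings =
      (PySem.List.enumerate strings).flatMap (fun p =>
        ((PySem.List.enumerate strings).filter (fun q => decide (q.1 < p.1) && amatch p.2 q.2)).map
          (fun q => (p.1, q.1))) := by
  unfold get_double_strings_index
  have hinner : ∀ (p : Int × List String) (acc : List (Int × Int)),
      (PySem.List.enumerate strings).foldl (fun result_list q =>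
        if p.1 > q.1 then
          let result := List.zipWith compare_values p.2 q.2
          if PySem.List.pyGetD result 0 false && PySem.List.pyGetD result 1 false then
            result_list ++ [(p.1, q.1)]
          else result_list
        else result_list) acc
      = acc ++ ((PySem.List.enumerate strings).filter
          (fun q => decide (q.1 < p.1) && amatch p.2 q.2)).map (fun q => (p.1, q.1)) := by
    intro p acc
    rw [PySem.List.foldl_congr_mem _ _
      (fun acc q => if (decide (q.1 < p.1) && amatch p.2 q.2) then acc ++ [(p.1, q.1)] else acc) acc ?_]
    · exact PySem.List.foldl_append_if _ _ _ _
    · intro acc q _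
      simp only [amatch]
      by_cases h1 : q.1 < p.1
      · simp [h1, gt_iff_lt]
      · simp [h1, gt_iff_lt]
  rw [PySem.List.foldl_congr_mem _ _
    (fun acc p => acc ++ ((PySem.List.enumerate strings).filter
        (fun q => decide (q.1 < p.1) && amatch p.2 q.2)).map (fun q => (p.1, q.1))) [] ?_]
  · exact PySem.List.foldl_append_eq_flatMap _ _ _
  · intro acc p _
    exact hinner p acc


theorem pv_filter_flatMap {α β : Type} (f : α → List β) (t : β → Bool) (l : List α) :
    (l.flatMap f).filter t = l.flatMap (fun a => (f a).filter t) := by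
  induction l with
  | nil => rfl
  | cons a l ih => simp [List.filter_append, ih]

theorem pv_flatMap_congr {α β : Type} {f g : α → List β} (l : List α)
    (h : ∀ a ∈ l, f a = g a) : l.flatMap f = l.flatMap g := by
  induction l with
  | nil => rfl
  | cons a l ih =>
      simp only [List.flatMap_cons, h a (by simp)]
      rw [ih (fun a ha => h a (by simp [ha]))]

theorem pv_A_inner (pre post : List (List String)) (r : List String)
    (hpre : (pre ++ r :: post).Pairwise pvOk) :
    (get_double_strings_index (pre ++ r :: post)).foldl
      (fun str_ ip =>
        if ((pre.length : Int)) == ip.1 then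
          some (merge_strings (PySem.List.pyGetD (pre ++ r :: post) ip.1 [])
                              (PySem.List.pyGetD (pre ++ r :: post) ip.2 []))
        else if ((pre.length : Int)) == ip.2 then none
        else str_) (some r)
      =
      (if (PySem.List.enumerate (pre ++ r :: post)).any
            (fun q => decide ((pre.length : Int) < q.1) && (q.2.take 2 == r.take 2)) then none
       else
        match ((PySem.List.enumerate (pre ++ r :: post)).filter
            (fun q => decide (q.1 < (pre.length : Int)) && (q.2.take 2 == r.take 2))).getLast? with
        | some q => some (merge_strings r q.2)
        | none => some r) := by
  have hok_pre : ∀ q ∈ PySem.List.enumerate pre 0, pvOk r q.2 := by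
    intro q hq
    obtain ⟨k, hk, rfl⟩ := (PySem.List.mem_enumerate_iff pre 0 q).mp hq
    have hmem : pre[k] ∈ pre := List.getElem_mem hk
    exact pv_ok_symm ((List.pairwise_append.mp hpre).2.2 pre[k] hmem r (by simp))
  have hok_post : ∀ q ∈ PySem.List.enumerate post ((pre.length : Int) + 1), pvOk q.2 r := by
    intro q hq
    obtain ⟨k, hk, rfl⟩ := (PySem.List.mem_enumerate_iff post _ q).mp hq
    have hmem : post[k] ∈ post := List.getElem_mem hk
    have hcons := (List.pairwise_append.mp hpre).2.1
    exact pv_ok_symm ((List.pairwise_cons.mp hcons).1 post[k] hmem)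
  -- rewrite the RHS into split form first
  rw [pv_any_later pre r post (fun s => s.take 2 == r.take 2),
      (pv_filter_prev pre r post (fun s => s.take 2 == r.take 2)).trans
        (pv_filter_prev' pre (fun s => s.take 2 == r.take 2))]
  -- the inner loop is a constant-update fold
  rw [PySem.List.foldl_congr_mem _ _
    (fun s ip => if (((pre.length : Int) == ip.1) || ((pre.length : Int) == ip.2)) then
        (if (pre.length : Int) == ip.1 then
          some (merge_strings (PySem.List.pyGetD (pre ++ r :: post) ip.1 [])
                              (PySem.List.pyGetD (pre ++ r :: post) ip.2 [])) else none)
      else s) _ ?caseB]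
  case caseB =>
    intro acc ip _
    by_cases h1 : (pre.length : Int) = ip.1
    · simp [h1]
    · by_cases h2 : (pre.length : Int) = ip.2 <;> simp [h1, h2]
  rw [pv_foldl_cu]
  rw [pv_dsi]
  rw [pv_enum_split pre r post]
  rw [List.flatMap_append, List.flatMap_cons, List.filter_append, List.filter_append]
  have hb1 : ∀ q ∈ PySem.List.enumerate pre 0, q.1 < (pre.length : Int) := by
    intro q hq; have := pv_mem_enum_bounds hq; omega
  have hb2 : ∀ q ∈ PySem.List.enumerate post ((pre.length : Int) + 1), (pre.length : Int) < q.1 := by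
    intro q hq; have := pv_mem_enum_bounds hq; omega
  -- part 1: pairs generated by earlier rows never touch position pre.length
  have hS1 : (((PySem.List.enumerate pre 0).flatMap (fun p =>
      (((PySem.List.enumerate pre 0) ++ ((pre.length : Int), r) ::
          (PySem.List.enumerate post ((pre.length : Int) + 1))).filter
        (fun q => decide (q.1 < p.1) && amatch p.2 q.2)).map
        (fun q => (p.1, q.1)))).filter
          (fun ip => (pre.length : Int) == ip.1 || (pre.length : Int) == ip.2)) = [] := by
    apply List.filter_eq_nil_iff.mpr
    intro a ha
    obtain ⟨p, hp, ha⟩ := List.mem_flatMap.mp ha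
    obtain ⟨q, hq, rfl⟩ := List.mem_map.mp ha
    have hqf := List.mem_filter.mp hq
    have hq1 : q.1 < p.1 := by
      have := hqf.2; simp only [Bool.and_eq_true, decide_eq_true_eq] at this; exact this.1
    have hp1 : p.1 < (pre.length : Int) := hb1 p hp
    simp only [Bool.or_eq_true, beq_iff_eq, not_or]
    constructor <;> omega
  -- part 2: the block generated by row pre.length itself
  have hS2 : (((((PySem.List.enumerate pre 0) ++ ((pre.length : Int), r) ::
        (PySem.List.enumerate post ((pre.length : Int) + 1))).filter
        (fun q => decide (q.1 < (pre.length : Int)) && amatch r q.2)).map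
      (fun q => ((pre.length : Int), q.1))).filter
        (fun ip => (pre.length : Int) == ip.1 || (pre.length : Int) == ip.2))
      = (((PySem.List.enumerate pre 0).filter (fun q => q.2.take 2 == r.take 2)).map
          (fun q => ((pre.length : Int), q.1))) := by
    rw [List.filter_eq_self.mpr (by
      intro a ha
      obtain ⟨q, hq, rfl⟩ := List.mem_map.mp ha
      simp)]
    rw [← pv_enum_split pre r post,
        (pv_filter_prev pre r post (fun s => amatch r s)).trans
          (pv_filter_prev' pre (fun s => amatch r s))]
    congr 1
    apply List.filter_congr
    intro q hq
    exact pv_amatch_key r q.2 (hok_pre q hq)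
  -- part 3: blocks generated by later rows contribute (p.1, pre.length) when they match row r
  have hS3 : (((PySem.List.enumerate post ((pre.length : Int) + 1)).flatMap (fun p =>
      (((PySem.List.enumerate pre 0) ++ ((pre.length : Int), r) ::
          (PySem.List.enumerate post ((pre.length : Int) + 1))).filter
        (fun q => decide (q.1 < p.1) && amatch p.2 q.2)).map
        (fun q => (p.1, q.1)))).filter
          (fun ip => (pre.length : Int) == ip.1 || (pre.length : Int) == ip.2))
      = (((PySem.List.enumerate post ((pre.length : Int) + 1)).filter
            (fun p => p.2.take 2 == r.take 2)).map (fun p => (p.1, (pre.length : Int)))) := by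
    rw [pv_filter_flatMap]
    rw [pv_flatMap_congr (PySem.List.enumerate post ((pre.length : Int) + 1))
        (g := fun p => if amatch p.2 r then [(p.1, (pre.length : Int))] else []) ?blocks]
    · rw [pv_flatMap_if]
      have : (PySem.List.enumerate post ((pre.length : Int) + 1)).filter (fun p => amatch p.2 r)
          = (PySem.List.enumerate post ((pre.length : Int) + 1)).filter
              (fun p => p.2.take 2 == r.take 2) := by
        apply List.filter_congr
        intro q hq
        rw [pv_amatch_key q.2 r (hok_post q hq)]
        exact pv_beq_comm _ _
      rw [this]
    case blocks =>
      intro p hp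
      have hpi : (pre.length : Int) < p.1 := hb2 p hp
      dsimp only
      rw [List.filter_map, List.filter_filter]
      simp only [Function.comp]
      have hone : (((PySem.List.enumerate pre 0) ++ ((pre.length : Int), r) ::
          (PySem.List.enumerate post ((pre.length : Int) + 1))).filter
          (fun q => ((pre.length : Int) == p.1 || (pre.length : Int) == q.1) &&
            (decide (q.1 < p.1) && amatch p.2 q.2)))
          = if amatch p.2 r then [((pre.length : Int), r)] else [] := by
        rw [List.filter_append, List.filter_cons]
        have e1 : ((PySem.List.enumerate pre 0).filter
            (fun q => ((pre.length : Int) == p.1 || (pre.length : Int) == q.1) &&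
              (decide (q.1 < p.1) && amatch p.2 q.2))) = [] := by
          apply List.filter_eq_nil_iff.mpr
          intro q hq
          have h1 := hb1 q hq
          simp only [Bool.and_eq_true, Bool.or_eq_true, beq_iff_eq, decide_eq_true_eq, not_and, not_or]
          intro h
          omega
        have e2 : ((PySem.List.enumerate post ((pre.length : Int) + 1)).filter
            (fun q => ((pre.length : Int) == p.1 || (pre.length : Int) == q.1) &&
              (decide (q.1 < p.1) && amatch p.2 q.2))) = [] := by
          apply List.filter_eq_nil_iff.mpr
          intro q hq
          have h1 := hb2 q hq
          simp only [Bool.and_eq_true, Bool.or_eq_true, beq_iff_eq, decide_eq_true_eq, not_and, not_or]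
          intro h
          omega
        rw [e1, e2]
        by_cases hm : amatch p.2 r
        · simp [hm, hpi]
        · simp [hm, hpi]
      rw [hone]
      by_cases hm : amatch p.2 r
      · simp [hm]
      · simp [hm]
  rw [hS1, hS2, hS3]
  simp only [List.nil_append]
  have hsnd : (((PySem.List.enumerate post ((pre.length : Int) + 1)).filter
        (fun p => p.2.take 2 == r.take 2)).map Prod.snd)
      = post.filter (fun s => s.take 2 == r.take 2) := by
    have h1 : (((PySem.List.enumerate post ((pre.length : Int) + 1)).filter
          (fun p => p.2.take 2 == r.take 2)).map Prod.snd)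
        = (((PySem.List.enumerate post ((pre.length : Int) + 1)).map Prod.snd).filter
            (fun s => s.take 2 == r.take 2)) := by
      rw [List.filter_map]; rfl
    have h2 : ((PySem.List.enumerate post ((pre.length : Int) + 1)).map Prod.snd) = post := by
      have := PySem.List.map_snd_enumerate post ((pre.length : Int) + 1)
      simpa using this
    rw [h1, h2]
  by_cases hlater : post.any (fun s => s.take 2 == r.take 2)
  · rw [if_pos hlater]
    have hne : ((PySem.List.enumerate post ((pre.length : Int) + 1)).filter
        (fun p => p.2.take 2 == r.take 2)) ≠ [] := by
      intro hnil
      rw [hnil] at hsnd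
      obtain ⟨x, hx, hPx⟩ := List.any_eq_true.mp hlater
      have : x ∈ post.filter (fun s => s.take 2 == r.take 2) := List.mem_filter.mpr ⟨hx, hPx⟩
      rw [← hsnd] at this
      simp at this
    obtain ⟨p0, hp0⟩ : ∃ p0, ((PySem.List.enumerate post ((pre.length : Int) + 1)).filter
        (fun p => p.2.take 2 == r.take 2)).getLast? = some p0 := by
      cases hgl : ((PySem.List.enumerate post ((pre.length : Int) + 1)).filter
          (fun p => p.2.take 2 == r.take 2)).getLast? with
      | none => exact absurd (List.getLast?_eq_none_iff.mp hgl) hne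
      | some b => exact ⟨b, rfl⟩
    rw [List.getLast?_append, List.getLast?_map, hp0]
    have hp0mem : p0 ∈ PySem.List.enumerate post ((pre.length : Int) + 1) :=
      (List.mem_filter.mp (List.mem_of_getLast? hp0)).1
    have hlt : (pre.length : Int) < p0.1 := hb2 p0 hp0mem
    rw [Option.map_some, Option.some_or, Option.elim_some]
    have hne2 : (((pre.length : Int)) == p0.1) = false := by simp; omega
    rw [hne2]
    simp
  · rw [if_neg hlater]
    have hq2 : ((PySem.List.enumerate post ((pre.length : Int) + 1)).filter
        (fun p => p.2.take 2 == r.take 2)) = [] := by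
      have hfil : post.filter (fun s => s.take 2 == r.take 2) = [] := by
        apply List.filter_eq_nil_iff.mpr
        intro a ha
        exact fun hPa => hlater (List.any_eq_true.mpr ⟨a, ha, hPa⟩)
      rw [hfil] at hsnd
      exact List.map_eq_nil_iff.mp hsnd
    rw [hq2, List.map_nil, List.append_nil]
    rw [List.getLast?_map]
    cases hgl : ((PySem.List.enumerate pre 0).filter
        (fun q => q.2.take 2 == r.take 2)).getLast? with
    | none => rfl
    | some q0 =>
        have hq0mem : q0 ∈ PySem.List.enumerate pre 0 :=
          (List.mem_filter.mp (List.mem_of_getLast? hgl)).1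
        rw [Option.map_some, Option.elim_some, if_pos (by simp)]
        rw [pv_getD_mid pre r post, pv_getD_enum pre (r :: post) hq0mem]

theorem pv_A_eq (strings : List (List String)) (h : Pre_merge_duplicated_strings strings) :
    merge_duplicated_strings strings = pvOut strings := by
  unfold merge_duplicated_strings pvOut
  apply PySem.List.foldl_congr_mem
  intro acc p hp
  obtain ⟨pre, post, hsplit, hidx⟩ := pv_mem_split hp
  subst hsplit
  dsimp only
  rw [hidx]
  rw [pv_A_inner pre post p.2 h]
  unfold pvV
  by_cases hany : (PySem.List.enumerate (pre ++ p.2 :: post)).any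
      (fun q => decide ((pre.length : Int) < q.1) && (q.2.take 2 == p.2.take 2))
  · rw [if_pos hany, if_pos hany]
    simp
  · rw [if_neg hany, if_neg hany]
    cases hgl : ((PySem.List.enumerate (pre ++ p.2 :: post)).filter
        (fun q => decide (q.1 < (pre.length : Int)) && (q.2.take 2 == p.2.take 2))).getLast? with
    | none =>
        by_cases he : p.2.isEmpty
        · simp [he]
        · simp [he]
    | some q0 =>
        by_cases he : (merge_strings p.2 q0.2).isEmpty
        · simp [he]
        · simp [he]

-- B-side: the step function of the second pass, and the two dictionaries
def pvStep (last_idx : PySem.Dict (List String) Int)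
    (st : List (List String) × PySem.Dict (List String) (List String))
    (p : Int × List String) :
    List (List String) × PySem.Dict (List String) (List String) :=
  let key := p.2.take 2
  let result :=
    if last_idx.get? key == some p.1 then
      let merged := match st.2.get? key with
        | some pr => List.zipWith (fun a b => if a ≠ "" then a else b) p.2 pr
        | none => p.2
      if merged.isEmpty then st.1 else st.1 ++ [merged]
    else st.1
  (result, st.2.insert key p.2)

def pvLast (strings : List (List String)) : PySem.Dict (List String) Int :=
  (PySem.List.enumerate strings).foldl (fun d p => d.insert (p.2.take 2) p.1) PySem.Dict.empty

def pvPrev (l : List (List String)) : PySem.Dict (List String) (List String) :=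
  l.foldl (fun d row => d.insert (row.take 2) row) PySem.Dict.empty


theorem pv_lastD_get (l : List (Int × List String)) (d : PySem.Dict (List String) Int)
    (k : List String) :
    (l.foldl (fun d p => d.insert (p.2.take 2) p.1) d).get? k =
      ((l.filter (fun p => p.2.take 2 == k)).getLast?).elim (d.get? k) (fun p => some p.1) := by
  induction l generalizing d with
  | nil => rfl
  | cons a l ih =>
      rw [List.foldl_cons, ih, List.filter_cons]
      by_cases h : a.2.take 2 = k
      · simp only [h, beq_self_eq_true, if_true]
        cases hfl : (l.filter (fun p => p.2.take 2 == k)).getLast? with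
        | none =>
            have he : l.filter (fun p => p.2.take 2 == k) = [] := List.getLast?_eq_none_iff.mp hfl
            simp [he, PySem.Dict.get?_insert, h]
        | some b => simp [List.getLast?_cons, hfl]
      · have hb : (a.2.take 2 == k) = false := beq_eq_false_iff_ne.mpr h
        simp only [hb, if_false, Bool.false_eq_true]
        cases hfl : (l.filter (fun p => p.2.take 2 == k)).getLast? with
        | none =>
            simp only [hfl, Option.elim]
            rw [PySem.Dict.get?_insert]
            simp [Ne.symm h]
        | some b => simp [hfl]

theorem pv_prevD_get (l : List (List String)) (d : PySem.Dict (List String) (List String))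
    (k : List String) :
    (l.foldl (fun d row => d.insert (row.take 2) row) d).get? k =
      ((l.filter (fun row => row.take 2 == k)).getLast?).elim (d.get? k) (fun row => some row) := by
  induction l generalizing d with
  | nil => rfl
  | cons a l ih =>
      rw [List.foldl_cons, ih, List.filter_cons]
      by_cases h : a.take 2 = k
      · simp only [h, beq_self_eq_true, if_true]
        cases hfl : (l.filter (fun row => row.take 2 == k)).getLast? with
        | none =>
            have he : l.filter (fun row => row.take 2 == k) = [] := List.getLast?_eq_none_iff.mp hfl
            simp [he, PySem.Dict.get?_insert, h]
        | some b => simp [List.getLast?_cons, hfl]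
      · have hb : (a.take 2 == k) = false := beq_eq_false_iff_ne.mpr h
        simp only [hb, if_false, Bool.false_eq_true]
        cases hfl : (l.filter (fun row => row.take 2 == k)).getLast? with
        | none =>
            simp only [hfl, Option.elim]
            rw [PySem.Dict.get?_insert]
            simp [Ne.symm h]
        | some b => simp [hfl]

theorem pv_merge_fun (r q : List String) :
    List.zipWith (fun a b : String => if a ≠ "" then a else b) r q = merge_strings r q := by
  have : (fun a b : String => if a ≠ "" then a else b) = concatenate_strings := by
    funext a b
    unfold concatenate_strings
    by_cases ha : a = "" <;> by_cases hb : b = "" <;> simp [ha, hb]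
  rw [this]
  rfl

theorem pv_prev_get (l : List (List String)) (k : List String) :
    (pvPrev l).get? k = (l.filter (fun row => row.take 2 == k)).getLast? := by
  unfold pvPrev
  rw [pv_prevD_get l PySem.Dict.empty k]
  cases (l.filter (fun row => row.take 2 == k)).getLast? with
  | none => simp [PySem.Dict.get?_empty]
  | some b => simp

theorem pv_last_cond (pre post : List (List String)) (r : List String) :
    ((pvLast (pre ++ r :: post)).get? (r.take 2) == some ((pre.length : Int)))
      = !(post.any (fun s => s.take 2 == r.take 2)) := by
  unfold pvLast
  rw [pv_lastD_get _ PySem.Dict.empty _]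
  rw [pv_enum_split pre r post, List.filter_append, List.filter_cons]
  simp only [beq_self_eq_true, if_pos]
  have hsnd : (((PySem.List.enumerate post ((pre.length : Int) + 1)).filter
        (fun p => p.2.take 2 == r.take 2)).map Prod.snd)
      = post.filter (fun s => s.take 2 == r.take 2) := by
    have h1 : (((PySem.List.enumerate post ((pre.length : Int) + 1)).filter
          (fun p => p.2.take 2 == r.take 2)).map Prod.snd)
        = (((PySem.List.enumerate post ((pre.length : Int) + 1)).map Prod.snd).filter
            (fun s => s.take 2 == r.take 2)) := by
      rw [List.filter_map]; rfl
    have h2 : ((PySem.List.enumerate post ((pre.length : Int) + 1)).map Prod.snd) = post := by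
      have := PySem.List.map_snd_enumerate post ((pre.length : Int) + 1)
      simpa using this
    rw [h1, h2]
  by_cases hlater : post.any (fun s => s.take 2 == r.take 2)
  · have hne : ((PySem.List.enumerate post ((pre.length : Int) + 1)).filter
        (fun p => p.2.take 2 == r.take 2)) ≠ [] := by
      intro hnil
      rw [hnil] at hsnd
      obtain ⟨x, hx, hPx⟩ := List.any_eq_true.mp hlater
      have : x ∈ post.filter (fun s => s.take 2 == r.take 2) := List.mem_filter.mpr ⟨hx, hPx⟩
      rw [← hsnd] at this
      simp at this
    obtain ⟨p0, hp0⟩ : ∃ p0, ((PySem.List.enumerate post ((pre.length : Int) + 1)).filter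
        (fun p => p.2.take 2 == r.take 2)).getLast? = some p0 := by
      cases hgl : ((PySem.List.enumerate post ((pre.length : Int) + 1)).filter
          (fun p => p.2.take 2 == r.take 2)).getLast? with
      | none => exact absurd (List.getLast?_eq_none_iff.mp hgl) hne
      | some b => exact ⟨b, rfl⟩
    have hp0mem : p0 ∈ PySem.List.enumerate post ((pre.length : Int) + 1) :=
      (List.mem_filter.mp (List.mem_of_getLast? hp0)).1
    have hlt : (pre.length : Int) < p0.1 := by
      have := pv_mem_enum_bounds hp0mem; omega
    rw [List.getLast?_append, List.getLast?_cons, hp0]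
    simp only [Option.getD_some, Option.some_or, Option.elim_some]
    rw [hlater]
    simp only [Bool.not_true]
    simp only [Option.some.injEq, beq_eq_false_iff_ne, ne_eq]
    omega
  · have hq2 : ((PySem.List.enumerate post ((pre.length : Int) + 1)).filter
        (fun p => p.2.take 2 == r.take 2)) = [] := by
      have hfil : post.filter (fun s => s.take 2 == r.take 2) = [] := by
        apply List.filter_eq_nil_iff.mpr
        intro a ha
        exact fun hPa => hlater (List.any_eq_true.mpr ⟨a, ha, hPa⟩)
      rw [hfil] at hsnd
      exact List.map_eq_nil_iff.mp hsnd
    rw [hq2, List.getLast?_append, List.getLast?_cons]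
    simp only [List.getLast?_nil, Option.getD_none, Option.some_or, Option.elim_some]
    rw [eq_false_of_ne_true hlater]  -- placeholder, fixed below if needed
    simp

theorem pv_B_go (strings : List (List String)) :
    ∀ (post pre : List (List String)) (acc : List (List String)),
      strings = pre ++ post →
      ((PySem.List.enumerate post ((pre.length : Int))).foldl
          (pvStep (pvLast strings)) (acc, pvPrev pre)).1
        = acc ++ (PySem.List.enumerate post ((pre.length : Int))).flatMap
            (fun p => (pvV strings p.1 p.2).toList) := by
  intro post
  induction post with
  | nil => intro pre acc _; simp [PySem.List.enumerate_nil]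
  | cons r post' ih =>
      intro pre acc hsplit
      rw [PySem.List.enumerate_cons, List.foldl_cons, List.flatMap_cons]
      have hdict : (pvPrev pre).insert (r.take 2) r = pvPrev (pre ++ [r]) := by
        unfold pvPrev
        rw [List.foldl_append]
        rfl
      have hstep : pvStep (pvLast strings) (acc, pvPrev pre) ((pre.length : Int), r)
          = (acc ++ (pvV strings ((pre.length : Int)) r).toList, pvPrev (pre ++ [r])) := by
        unfold pvStep
        dsimp only
        rw [hdict]
        congr 1
        subst hsplit
        rw [pv_last_cond pre post' r]
        unfold pvV
        rw [pv_any_later pre r post' (fun s => s.take 2 == r.take 2),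
            (pv_filter_prev pre r post' (fun s => s.take 2 == r.take 2)).trans
              (pv_filter_prev' pre (fun s => s.take 2 == r.take 2))]
        by_cases hlater : post'.any (fun s => s.take 2 == r.take 2)
        · rw [hlater]
          simp
        · rw [eq_false_of_ne_true hlater]
          simp only [Bool.not_false, if_pos, Bool.false_eq_true, if_neg]
          rw [pv_prev_get pre (r.take 2)]
          have hcorr := pv_snd_filter_getLast pre 0 (fun s => s.take 2 == r.take 2)
          cases hgl : ((PySem.List.enumerate pre 0).filter
              (fun q => q.2.take 2 == r.take 2)).getLast? with
          | none =>
              rw [hgl] at hcorr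
              rw [← hcorr]
              simp only [Option.map_none]
              by_cases he : r.isEmpty <;> simp [he]
          | some q0 =>
              rw [hgl] at hcorr
              rw [← hcorr]
              simp only [Option.map_some]
              rw [pv_merge_fun r q0.2]
              by_cases he : (merge_strings r q0.2).isEmpty <;> simp [he]
      rw [hstep]
      have hlen : ((pre ++ [r]).length : Int) = (pre.length : Int) + 1 := by
        simp
      have := ih (pre ++ [r]) (acc ++ (pvV strings ((pre.length : Int)) r).toList)
        (by rw [hsplit, List.append_assoc]; rfl)
      rw [hlen] at this
      rw [this, List.append_assoc]

theorem pv_B_eq (strings : List (List String)) :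
    merge_duplicated_strings_alt strings = pvOut strings := by
  have h0 := pv_B_go strings strings [] [] rfl
  simp only [List.length_nil, Nat.cast_zero, List.nil_append] at h0
  unfold pvOut
  rw [PySem.List.foldl_append_eq_flatMap, List.nil_append]
  exact h0

-- ===== VERDICT (by name: the statement is the Claim_ definition above) =====
theorem merge_duplicated_strings_spec : Claim_equal_merge_duplicated_strings := by
  intro strings _ hpre
  unfold Spec_merge_duplicated_strings
  rw [pv_A_eq strings hpre, pv_B_eq strings]
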